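-- pv_equiv track=rewrite | github.com/openimagingdata/findingmodels | findingmodels/hood/mergers.py | _check_required_attributes
-- ===== SOURCE A (Python) =====
-- from typing import Dict, List, Tuple
--
-- def _check_required_attributes(incoming_grouped: Dict, existing_grouped: Dict) -> Dict:
--     """Check for presence and change_from_prior in both models."""
--     incoming_has_presence = any(
--         attr.get('_classification') == 'presence'
--         for attr_list in incoming_grouped.values()
--         for attr in attr_list
--     )
--     existing_has_presence = any(
--         attr.get('_classification') == 'presence'
--         for attr_list in existing_grouped.values()
--         for attr in attr_list
--     )
--
--     incoming_has_change = any(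
--         attr.get('_classification') == 'change_from_prior'
--         for attr_list in incoming_grouped.values()
--         for attr in attr_list
--     )
--     existing_has_change = any(
--         attr.get('_classification') == 'change_from_prior'
--         for attr_list in existing_grouped.values()
--         for attr in attr_list
--     )
--
--     return {
--         'incoming_has_presence': incoming_has_presence,
--         'existing_has_presence': existing_has_presence,
--         'incoming_has_change': incoming_has_change,
--         'existing_has_change': existing_has_change
--     }
-- ===== SOURCE B (Python) =====
-- def _scan(grouped):
--     """Single pass over grouped's attributes, accumulating both flags,
--     breaking out as soon as both have been found."""
--     has_presence = False
--     has_change = False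
--     for attr in (a for attr_list in grouped.values() for a in attr_list):
--         c = attr.get('_classification')
--         has_presence = has_presence or c == 'presence'
--         has_change = has_change or c == 'change_from_prior'
--         if has_presence and has_change:
--             return True, True
--     return has_presence, has_change
--
--
-- def _check_required_attributes(incoming_grouped, existing_grouped):
--     """Check for presence and change_from_prior in both models."""
--     incoming_has_presence, incoming_has_change = _scan(incoming_grouped)
--     existing_has_presence, existing_has_change = _scan(existing_grouped)
--     return {
--         'incoming_has_presence': incoming_has_presence,
--         'existing_has_presence': existing_has_presence,
--         'incoming_has_change': incoming_has_change,
--         'existing_has_change': existing_has_change,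
--     }
-- ===== Notes on version B (the rewrite author's own statement) =====
-- stated objective: alternative
-- what changed: B replaces A's four independent full generator scans by one fused short-circuiting pass per grouped dict that accumulates both flags simultaneously and exits early once both are found.
import Mathlib
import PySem

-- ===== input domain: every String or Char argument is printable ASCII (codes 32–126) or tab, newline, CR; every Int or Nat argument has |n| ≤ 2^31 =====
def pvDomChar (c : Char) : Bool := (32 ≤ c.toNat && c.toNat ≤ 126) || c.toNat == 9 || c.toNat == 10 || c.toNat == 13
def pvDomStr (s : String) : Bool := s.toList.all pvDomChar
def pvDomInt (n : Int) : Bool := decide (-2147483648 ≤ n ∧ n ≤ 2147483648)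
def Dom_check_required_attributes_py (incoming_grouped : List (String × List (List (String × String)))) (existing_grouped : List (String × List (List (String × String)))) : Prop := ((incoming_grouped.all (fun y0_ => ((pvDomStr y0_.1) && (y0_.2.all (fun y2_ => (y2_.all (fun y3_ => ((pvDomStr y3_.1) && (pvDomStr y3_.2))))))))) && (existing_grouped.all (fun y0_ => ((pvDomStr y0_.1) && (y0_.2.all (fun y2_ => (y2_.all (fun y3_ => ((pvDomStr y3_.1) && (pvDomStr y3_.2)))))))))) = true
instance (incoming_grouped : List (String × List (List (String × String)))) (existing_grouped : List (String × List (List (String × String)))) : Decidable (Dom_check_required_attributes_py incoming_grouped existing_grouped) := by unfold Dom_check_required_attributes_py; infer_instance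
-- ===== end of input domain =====

-- ===== PORT A =====
-- B fuses A's four independent full scans into one short-circuiting accumulator pass
-- per grouped dict (objective: alternative; same asymptotic cost).
-- any(attr.get('_classification') == target for attr_list in grouped.values() for attr in attr_list)
def pvAnyClass (grouped : List (String × List (List (String × String)))) (target : String) : Bool :=
  (PySem.Dict.mk grouped).values.any (fun attr_list =>
    attr_list.any (fun attr => (PySem.Dict.mk attr).get? "_classification" == some target))

def check_required_attributes_py (incoming_grouped : List (String × List (List (String × String)))) (existing_grouped : List (String × List (List (String × String)))) : List (String × Bool) :=
  let incoming_has_presence := pvAnyClass incoming_grouped "presence"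
  let existing_has_presence := pvAnyClass existing_grouped "presence"
  let incoming_has_change := pvAnyClass incoming_grouped "change_from_prior"
  let existing_has_change := pvAnyClass existing_grouped "change_from_prior"
  [("incoming_has_presence", incoming_has_presence),
   ("existing_has_presence", existing_has_presence),
   ("incoming_has_change", incoming_has_change),
   ("existing_has_change", existing_has_change)]

-- ===== PORT B =====
-- _scan's loop: one pass over the flattened attrs, accumulating both flags,
-- returning (True, True) early once both are set.
def pvScanLoop (attrs : List (List (String × String))) (has_presence has_change : Bool) : Bool × Bool :=
  match attrs with
  | [] => (has_presence, has_change)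
  | attr :: rest =>
    let c := (PySem.Dict.mk attr).get? "_classification"
    let hp := has_presence || (c == some "presence")
    let hc := has_change || (c == some "change_from_prior")
    if hp && hc then (true, true) else pvScanLoop rest hp hc

-- _scan(grouped): the generator flattens grouped.values() into one attr stream
def pvScan (grouped : List (String × List (List (String × String)))) : Bool × Bool :=
  pvScanLoop ((PySem.Dict.mk grouped).values.flatMap (fun attr_list => attr_list)) false false

def check_required_attributes_py_alt (incoming_grouped : List (String × List (List (String × String)))) (existing_grouped : List (String × List (List (String × String)))) : List (String × Bool) :=
  let inc := pvScan incoming_grouped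
  let exi := pvScan existing_grouped
  [("incoming_has_presence", inc.1),
   ("existing_has_presence", exi.1),
   ("incoming_has_change", inc.2),
   ("existing_has_change", exi.2)]

-- ===== PRECONDITION & SPEC =====
def Spec_check_required_attributes_py (incoming_grouped : List (String × List (List (String × String)))) (existing_grouped : List (String × List (List (String × String)))) (out : List (String × Bool)) : Prop := out = check_required_attributes_py_alt incoming_grouped existing_grouped
instance (incoming_grouped : List (String × List (List (String × String)))) (existing_grouped : List (String × List (List (String × String)))) (out : List (String × Bool)) : Decidable (Spec_check_required_attributes_py incoming_grouped existing_grouped out) := by unfold Spec_check_required_attributes_py; infer_instance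

-- ===== CLAIM (what is proved, stated in full; the proofs are below) =====
def Claim_equal_check_required_attributes_py : Prop := ∀ (incoming_grouped : List (String × List (List (String × String)))) (existing_grouped : List (String × List (List (String × String)))), Dom_check_required_attributes_py incoming_grouped existing_grouped → Spec_check_required_attributes_py incoming_grouped existing_grouped (check_required_attributes_py incoming_grouped existing_grouped)

-- ===== LEMMAS AND PROOFS =====
theorem pvScanLoop_eq (attrs : List (List (String × String))) (hp hc : Bool) :
    pvScanLoop attrs hp hc =
      (hp || attrs.any (fun attr => (PySem.Dict.mk attr).get? "_classification" == some "presence"),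
       hc || attrs.any (fun attr => (PySem.Dict.mk attr).get? "_classification" == some "change_from_prior")) := by
  induction attrs generalizing hp hc with
  | nil => simp [pvScanLoop]
  | cons attr rest ih =>
    simp only [pvScanLoop, List.any_cons]
    split
    · rename_i h
      simp only [Bool.and_eq_true] at h
      simp [h.1, h.2]
      constructor
      · cases hp <;> simp_all
      · cases hc <;> simp_all
    · rw [ih]
      simp [Bool.or_assoc]

theorem pvScan_eq (grouped : List (String × List (List (String × String)))) :
    pvScan grouped = (pvAnyClass grouped "presence", pvAnyClass grouped "change_from_prior") := by
  simp only [pvScan, pvScanLoop_eq, pvAnyClass, Bool.false_or]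
  refine Prod.ext ?_ ?_ <;>
  · rw [Bool.eq_iff_iff]
    simp [List.any_eq_true]

-- ===== VERDICT (by name: the statement is the Claim_ definition above) =====
theorem check_required_attributes_py_spec : Claim_equal_check_required_attributes_py := by
  intro i e _
  show _ = _
  simp only [check_required_attributes_py, check_required_attributes_py_alt, pvScan_eq]
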